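-- pv_equiv track=rewrite | github.com/PrithwishJana/CoTran | transpilers/TSS_CodeConv_PyTranslations/853/GFG.py | countCubes
-- ===== SOURCE A (Python) =====
-- def countCubes(a, b):
--     cnt = 0
--     for i in range(a, b + 1):
--         j = 1
--         while j * j * j <= i:
--             if j * j * j == i:
--                 cnt += 1
--             j += 1
--     return cnt
-- ===== SOURCE B (Python) =====
-- def countCubes(a, b):
--     # Count j >= 1 with a <= j^3 <= b via integer cube roots of the endpoints.
--     if b < a:
--         return 0
--
--     def f(x):
--         # number of j >= 1 with j*j*j <= x
--         if x < 1:
--             return 0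
--         hi = 1
--         while hi * hi * hi <= x:
--             hi *= 2
--         lo = 1
--         while lo + 1 < hi:
--             mid = (lo + hi) // 2
--             if mid * mid * mid <= x:
--                 lo = mid
--             else:
--                 hi = mid
--         return lo
--
--     return f(b) - f(a - 1)
-- ===== Notes on version B (the rewrite author's own statement) =====
-- stated objective: alternative
-- what changed: Instead of scanning every i in [a,b] and testing each against all cubes up to i, B computes the integer cube roots of the endpoints by doubling+binary search and returns their difference.
import Mathlib
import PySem

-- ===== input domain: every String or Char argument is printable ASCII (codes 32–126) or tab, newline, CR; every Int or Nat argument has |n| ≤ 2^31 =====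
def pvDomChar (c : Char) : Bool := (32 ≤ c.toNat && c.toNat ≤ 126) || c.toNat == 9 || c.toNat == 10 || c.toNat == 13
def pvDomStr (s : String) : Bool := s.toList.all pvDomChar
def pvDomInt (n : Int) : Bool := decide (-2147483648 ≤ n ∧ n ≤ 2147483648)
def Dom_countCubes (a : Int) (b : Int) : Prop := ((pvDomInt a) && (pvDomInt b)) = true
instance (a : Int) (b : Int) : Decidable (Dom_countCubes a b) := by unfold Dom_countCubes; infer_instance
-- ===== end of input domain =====

-- B replaces A's scan of every i in [a,b] (each tested by a trial-cube inner loop) with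
-- integer cube roots of the endpoints computed by doubling + binary search.

-- ===== PORT A =====
-- termination/positivity helpers cited by the recursive definitions below (kept as
-- named top-level theorems with small proof terms)
theorem pvSelfLeCube (j : Int) (hj : 1 ≤ j) : j ≤ j * j * j := by
  have h0 : (0:Int) ≤ j := le_trans zero_le_one hj
  have h2 : 1 * 1 ≤ j * j := mul_le_mul hj hj zero_le_one h0
  have h3 : 1 * 1 * j ≤ j * j * j := mul_le_mul_of_nonneg_right h2 h0
  rw [one_mul, one_mul] at h3
  exact h3

theorem pvOneLeSucc (j : Int) (hj : 1 ≤ j) : 1 ≤ j + 1 :=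
  le_trans hj (le_of_lt (lt_add_one j))

theorem pvDecInner (i j : Int) (hj : 1 ≤ j) (h : j * j * j ≤ i) :
    (i + 1 - (j + 1)).toNat < (i + 1 - j).toNat := by
  have hji : j ≤ i := le_trans (pvSelfLeCube j hj) h
  have hpos : 0 < i + 1 - j := sub_pos.mpr (lt_of_le_of_lt hji (lt_add_one i))
  exact (Int.toNat_lt_toNat hpos).mpr (sub_lt_sub_left (lt_add_one j) (i + 1))

-- inner while loop of A: j counts up while j*j*j <= i, adding 1 to cnt when j*j*j == i
def pvInner (i j cnt : Int) (hj : 1 ≤ j) : Int :=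
  if h : j * j * j ≤ i then
    pvInner i (j + 1) (if j * j * j = i then cnt + 1 else cnt) (pvOneLeSucc j hj)
  else cnt
termination_by (i + 1 - j).toNat
decreasing_by exact pvDecInner i j hj h

def countCubes (a : Int) (b : Int) : Int :=
  (PySem.List.pyRange a (b + 1) 1).foldl (fun cnt i => pvInner i 1 cnt (le_refl 1)) 0

-- ===== PORT B =====
-- termination helper for the binary-search loop (Python's // 2 on a dividend, divisor 2 > 0)
theorem pvFdiv2 (m : Int) : Int.fdiv m 2 = m / 2 := by
  rw [Int.fdiv_eq_ediv]; norm_num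

theorem pvOneLeDouble (hi : Int) (h : 1 ≤ hi) : 1 ≤ 2 * hi := by
  have h0 : (0:Int) ≤ hi := le_trans zero_le_one h
  have h2 : hi ≤ hi + hi := le_add_of_nonneg_left h0
  rw [← two_mul] at h2
  exact le_trans h h2

theorem pvLtDouble (hi : Int) (h : 1 ≤ hi) : hi < 2 * hi := by
  have h2 : hi < hi + hi := lt_add_of_pos_left hi (lt_of_lt_of_le zero_lt_one h)
  rw [← two_mul] at h2
  exact h2

theorem pvDecGrow (x hi : Int) (h : 1 ≤ hi) (hc : hi * hi * hi ≤ x) :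
    (x + 1 - 2 * hi).toNat < (x + 1 - hi).toNat := by
  have hix : hi ≤ x := le_trans (pvSelfLeCube hi h) hc
  have hpos : 0 < x + 1 - hi := sub_pos.mpr (lt_of_le_of_lt hix (lt_add_one x))
  exact (Int.toNat_lt_toNat hpos).mpr (sub_lt_sub_left (pvLtDouble hi h) (x + 1))

-- first while loop of B's f: double hi while hi*hi*hi <= x
def pvGrow (x hi : Int) (h : 1 ≤ hi) : Int :=
  if hc : hi * hi * hi ≤ x then pvGrow x (2 * hi) (pvOneLeDouble hi h) else hi
termination_by (x + 1 - hi).toNat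
decreasing_by exact pvDecGrow x hi h hc

theorem pvFloordiv2 (m : Int) : PySem.Int.floordiv m 2 = m / 2 := by
  simp only [PySem.Int.floordiv]
  exact pvFdiv2 m

theorem pvMidLb (lo hi : Int) (h : lo + 1 < hi) : lo < PySem.Int.floordiv (lo + hi) 2 := by
  have h2 : (lo + 1) * 2 ≤ lo + hi := by linarith
  have h3 : lo + 1 ≤ (lo + hi) / 2 := (Int.le_ediv_iff_mul_le (by norm_num)).mpr h2
  rw [pvFloordiv2]
  exact lt_of_lt_of_le (lt_add_one lo) h3

theorem pvMidUb (lo hi : Int) (h : lo + 1 < hi) : PySem.Int.floordiv (lo + hi) 2 < hi := by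
  have h2 : lo + hi < hi * 2 := by linarith
  rw [pvFloordiv2]
  exact (Int.ediv_lt_iff_lt_mul (by norm_num)).mpr h2

theorem pvDecSearchHi (x lo hi : Int) (h : lo + 1 < hi) :
    (hi - PySem.Int.floordiv (lo + hi) 2).toNat < (hi - lo).toNat := by
  have hpos : 0 < hi - lo := sub_pos.mpr (lt_trans (lt_add_one lo) h)
  exact (Int.toNat_lt_toNat hpos).mpr (sub_lt_sub_left (pvMidLb lo hi h) hi)

theorem pvDecSearchLo (x lo hi : Int) (h : lo + 1 < hi) :
    (PySem.Int.floordiv (lo + hi) 2 - lo).toNat < (hi - lo).toNat := by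
  have hpos : 0 < hi - lo := sub_pos.mpr (lt_trans (lt_add_one lo) h)
  exact (Int.toNat_lt_toNat hpos).mpr (sub_lt_sub_right (pvMidUb lo hi h) lo)

-- second while loop of B's f: binary search for the largest lo with lo*lo*lo <= x
def pvSearch (x lo hi : Int) : Int :=
  if h : lo + 1 < hi then
    let mid := PySem.Int.floordiv (lo + hi) 2
    if mid * mid * mid ≤ x then pvSearch x mid hi else pvSearch x lo mid
  else lo
termination_by (hi - lo).toNat
decreasing_by
  · exact pvDecSearchHi x lo hi h
  · exact pvDecSearchLo x lo hi h

-- B's helper f(x): number of j >= 1 with j*j*j <= x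
def pvCbrtCount (x : Int) : Int :=
  if x < 1 then 0 else pvSearch x 1 (pvGrow x 1 (le_refl 1))

def countCubes_alt (a : Int) (b : Int) : Int :=
  if b < a then 0 else pvCbrtCount b - pvCbrtCount (a - 1)

-- ===== PRECONDITION & SPEC =====
def Spec_countCubes (a : Int) (b : Int) (out : Int) : Prop := out = countCubes_alt a b
instance (a : Int) (b : Int) (out : Int) : Decidable (Spec_countCubes a b out) := by unfold Spec_countCubes; infer_instance

-- ===== CLAIM (what is proved, stated in full; the proofs are below) =====
def Claim_equal_countCubes : Prop := ∀ (a : Int) (b : Int), Dom_countCubes a b → Spec_countCubes a b (countCubes a b)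

-- ===== LEMMAS AND PROOFS =====

-- cubes are monotone on nonnegatives
theorem pvCubeMono {p q : Int} (hp : 0 ≤ p) (hpq : p ≤ q) : p * p * p ≤ q * q * q := by
  have hq : 0 ≤ q := le_trans hp hpq
  have h1 : p * p ≤ q * q := mul_le_mul hpq hpq hp hq
  exact mul_le_mul h1 hpq hp (mul_nonneg hq hq)

theorem pvCubeMonoStrict {p q : Int} (hp : 0 ≤ p) (hpq : p < q) : p * p * p < q * q * q := by
  have hq : 0 < q := lt_of_le_of_lt hp hpq
  have h1 : p * p ≤ q * q := mul_le_mul (le_of_lt hpq) (le_of_lt hpq) hp (le_of_lt hq)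
  calc p * p * p ≤ q * q * p := mul_le_mul_of_nonneg_right h1 hp
    _ < q * q * q := mul_lt_mul_of_pos_left hpq (mul_pos hq hq)

-- pvGrow returns hi' ≥ hi with x < hi'^3
theorem pvGrow_spec (x hi : Int) (h : 1 ≤ hi) :
    hi ≤ pvGrow x hi h ∧ x < pvGrow x hi h * pvGrow x hi h * pvGrow x hi h := by
  fun_induction pvGrow x hi h with
  | case1 hi h hc ih => exact ⟨by omega, ih.2⟩
  | case2 hi h hc => exact ⟨le_refl _, by omega⟩

-- pvSearch returns the floor cube root under the binary-search invariant
theorem pvSearch_spec (x : Int) : ∀ lo hi : Int, 1 ≤ lo → lo < hi →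
    lo * lo * lo ≤ x → x < hi * hi * hi →
    1 ≤ pvSearch x lo hi ∧ pvSearch x lo hi * pvSearch x lo hi * pvSearch x lo hi ≤ x ∧
      x < (pvSearch x lo hi + 1) * (pvSearch x lo hi + 1) * (pvSearch x lo hi + 1) := by
  intro lo hi
  fun_induction pvSearch x lo hi with
  | case1 lo hi h mid hmid ih =>
    intro h1 h2 h3 h4
    have hlb : lo < mid := pvMidLb lo hi h
    have hub : mid < hi := pvMidUb lo hi h
    exact ih (by omega) hub hmid h4
  | case2 lo hi h mid hmid ih =>
    intro h1 h2 h3 h4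
    have hlb : lo < mid := pvMidLb lo hi h
    have hub : mid < hi := pvMidUb lo hi h
    exact ih h1 hlb h3 (lt_of_not_ge hmid)
  | case3 lo hi h =>
    intro h1 h2 h3 h4
    have heq : hi = lo + 1 := by omega
    rw [heq] at h4
    exact ⟨h1, h3, h4⟩

-- characterization of B's f on x ≥ 1: it is the floor cube root
theorem pvCbrtCount_spec (x : Int) (hx : 1 ≤ x) :
    1 ≤ pvCbrtCount x ∧ pvCbrtCount x * pvCbrtCount x * pvCbrtCount x ≤ x ∧
      x < (pvCbrtCount x + 1) * (pvCbrtCount x + 1) * (pvCbrtCount x + 1) := by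
  rw [pvCbrtCount, if_neg (by omega : ¬ x < 1)]
  have hg := pvGrow_spec x 1 (le_refl 1)
  have hone : (1 : Int) * 1 * 1 ≤ x := by simpa using hx
  have hg2 : (1 : Int) < pvGrow x 1 (le_refl 1) := by
    rcases eq_or_lt_of_le hg.1 with h | h
    · exfalso
      have h2 := hg.2
      rw [← h] at h2
      norm_num at h2
      omega
    · exact h
  exact pvSearch_spec x 1 _ le_rfl hg2 hone hg.2

theorem pvCbrtCount_neg (x : Int) (hx : x < 1) : pvCbrtCount x = 0 := by
  simp [pvCbrtCount, hx]

-- uniqueness of the floor cube root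
theorem pvCbrt_unique (x n : Int) (hx : 1 ≤ x) (hn : 1 ≤ n)
    (h1 : n * n * n ≤ x) (h2 : x < (n + 1) * (n + 1) * (n + 1)) : pvCbrtCount x = n := by
  obtain ⟨hm, hm1, hm2⟩ := pvCbrtCount_spec x hx
  by_contra hne
  rcases lt_or_gt_of_ne hne with hlt | hgt
  · have := pvCubeMono (by omega : (0:Int) ≤ pvCbrtCount x + 1) (by omega : pvCbrtCount x + 1 ≤ n)
    omega
  · have := pvCubeMono (by omega : (0:Int) ≤ n + 1) (by omega : n + 1 ≤ pvCbrtCount x)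
    omega

-- A's inner loop, characterized by the floor cube root n of i
theorem pvInner_char (i n : Int) (hn : 1 ≤ n) (h1 : n * n * n ≤ i)
    (h2 : i < (n + 1) * (n + 1) * (n + 1)) :
    ∀ (k : Nat) (j cnt : Int) (hj : 1 ≤ j), j ≤ n + 1 → (n + 1 - j).toNat = k →
      pvInner i j cnt hj = cnt + (if j ≤ n ∧ n * n * n = i then 1 else 0) := by
  intro k
  induction k using Nat.strong_induction_on with
  | _ k ih =>
  intro j cnt hj hjn hk
  by_cases hend : j = n + 1
  · subst hend
    rw [pvInner, dif_neg (by omega : ¬ (n + 1) * (n + 1) * (n + 1) ≤ i)]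
    rw [if_neg (by omega : ¬ (n + 1 ≤ n ∧ n * n * n = i))]
    ring
  · have hjle : j ≤ n := by omega
    have hcube : j * j * j ≤ i := le_trans (pvCubeMono (by omega) hjle) h1
    rw [pvInner, dif_pos hcube]
    rw [ih (n + 1 - (j + 1)).toNat (by omega) (j + 1) _ (by omega) (by omega) rfl]
    by_cases hji : j * j * j = i
    · have hjeq : j = n := by
        by_contra hne
        have := pvCubeMonoStrict (by omega : (0:Int) ≤ j) (by omega : j < n)
        omega
      subst hjeq
      rw [if_pos hji]
      rw [if_neg (by omega : ¬ (j + 1 ≤ j ∧ j * j * j = i))]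
      rw [if_pos ⟨le_refl j, hji⟩]
      ring
    · rw [if_neg hji]
      by_cases hni : n * n * n = i
      · have hjlt : j < n := by
          rcases lt_or_eq_of_le hjle with h | h
          · exact h
          · exfalso; apply hji; rw [h]; exact hni
        rw [if_pos ⟨by omega, hni⟩, if_pos ⟨hjle, hni⟩]
      · rw [if_neg (by simp [hni]), if_neg (by simp [hni])]

-- each step of A adds f(i) - f(i-1)
theorem pvInner_step (i cnt : Int) (h : (1 : Int) ≤ 1) :
    pvInner i 1 cnt h = cnt + (pvCbrtCount i - pvCbrtCount (i - 1)) := by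
  by_cases hi : i < 1
  · rw [pvInner, dif_neg (by omega : ¬ (1:Int) * 1 * 1 ≤ i)]
    rw [pvCbrtCount_neg i hi, pvCbrtCount_neg (i - 1) (by omega)]
    omega
  · rw [Int.not_lt] at hi
    obtain ⟨hn, hn1, hn2⟩ := pvCbrtCount_spec i hi
    rw [pvInner_char i (pvCbrtCount i) hn hn1 hn2 (pvCbrtCount i + 1 - 1).toNat 1 cnt h
        (by omega) rfl]
    by_cases hcube : pvCbrtCount i * pvCbrtCount i * pvCbrtCount i = i
    · have hprev : pvCbrtCount (i - 1) = pvCbrtCount i - 1 := by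
        by_cases hi1 : i - 1 < 1
        · rw [pvCbrtCount_neg _ hi1]
          -- here i = 1, and the cube root of 1 is 1
          have hi' : i = 1 := by omega
          have hge : ¬ 2 ≤ pvCbrtCount i := by
            intro h2
            have := pvCubeMono (by omega : (0:Int) ≤ 2) h2
            norm_num at this
            omega
          omega
        · rw [Int.not_lt] at hi1
          apply pvCbrt_unique _ _ hi1
          · -- pvCbrtCount i ≥ 2 since i ≥ 2 is a cube
            by_contra hc
            have h1' : pvCbrtCount i = 1 := by omega
            rw [h1'] at hcube
            omega
          · have := pvCubeMonoStrict (by omega : (0:Int) ≤ pvCbrtCount i - 1)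
              (by omega : pvCbrtCount i - 1 < pvCbrtCount i)
            omega
          · have hr : pvCbrtCount i - 1 + 1 = pvCbrtCount i := by ring
            rw [hr]
            omega
      rw [hprev, if_pos ⟨hn, hcube⟩]
      ring
    · have hni : pvCbrtCount i * pvCbrtCount i * pvCbrtCount i < i := lt_of_le_of_ne hn1 hcube
      have hi2 : 1 ≤ i - 1 := by
        by_contra hc
        have hi' : i = 1 := by omega
        have h11 : (1:Int) * 1 * 1 ≤ pvCbrtCount i * pvCbrtCount i * pvCbrtCount i :=
          pvCubeMono (by omega) hn
        norm_num at h11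
        omega
      have hprev : pvCbrtCount (i - 1) = pvCbrtCount i := by
        apply pvCbrt_unique _ _ hi2 hn (by omega) (by omega)
      rw [hprev, if_neg (by simp [hcube])]
      ring
-- the fold over range(a, b+1) telescopes
theorem pvFold_telescope (a : Int) : ∀ k : Nat, ∀ b : Int, (b + 1 - a).toNat = k →
    countCubes a b = if b < a then 0 else pvCbrtCount b - pvCbrtCount (a - 1) := by
  intro k
  induction k with
  | zero =>
    intro b hb
    have hba : b < a := by omega
    rw [countCubes, PySem.List.pyRange_one_eq_nil (by omega), if_pos hba]
    rfl
  | succ k ih =>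
    intro b hb
    have hab : a ≤ b := by omega
    rw [countCubes, PySem.List.pyRange_one_succ_right hab, List.foldl_append]
    simp only [List.foldl_cons, List.foldl_nil]
    have hprev : (PySem.List.pyRange a b 1).foldl (fun cnt i => pvInner i 1 cnt (le_refl 1)) 0
        = countCubes a (b - 1) := by
      rw [countCubes, show b - 1 + 1 = b from by ring]
    rw [hprev, pvInner_step, ih (b - 1) (by omega)]
    by_cases hba : b - 1 < a
    · have hbe : b = a := by omega
      subst hbe
      rw [if_pos hba, if_neg (lt_irrefl b)]
      ring_nf
    · rw [if_neg hba, if_neg (by omega : ¬ b < a)]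
      ring

-- ===== VERDICT (by name: the statement is the Claim_ definition above) =====
theorem countCubes_spec : Claim_equal_countCubes := by
  intro a b _
  unfold Spec_countCubes countCubes_alt
  exact pvFold_telescope a (b + 1 - a).toNat b rfl
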